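-- pv_equiv track=rewrite | github.com/EdwinTh/advent_of_code | AoC_2017/day_06/script06.py | update
-- ===== SOURCE A (Python) =====
-- def update(nrs):
--     max_ind = nrs.index(max(nrs))
--     val = nrs[max_ind]
--     nrs[max_ind] = 0
--     update = max_ind + 1
--     while val > 0:
--         if update == len(nrs):
--             update = 0
--         nrs[update] += 1
--         val -= 1
--         update += 1
--     return nrs
-- ===== SOURCE B (Python) =====
-- def update(nrs):
--     n = len(nrs)
--     max_ind = nrs.index(max(nrs))
--     val = nrs[max_ind]
--     q, r = divmod(max(val, 0), n)
--     out = [v + q + (1 if (i - max_ind - 1) % n < r else 0) for i, v in enumerate(nrs)]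
--     out[max_ind] -= val
--     nrs[:] = out
--     return nrs
-- ===== Notes on version B (the rewrite author's own statement) =====
-- stated objective: faster
-- what changed: A distributes the max bank's blocks one at a time in a while loop over val iterations; B computes each cell's share in closed form with divmod (q blocks everywhere plus one extra for the first r positions after the max index) in a single O(n) pass.
import Mathlib
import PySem

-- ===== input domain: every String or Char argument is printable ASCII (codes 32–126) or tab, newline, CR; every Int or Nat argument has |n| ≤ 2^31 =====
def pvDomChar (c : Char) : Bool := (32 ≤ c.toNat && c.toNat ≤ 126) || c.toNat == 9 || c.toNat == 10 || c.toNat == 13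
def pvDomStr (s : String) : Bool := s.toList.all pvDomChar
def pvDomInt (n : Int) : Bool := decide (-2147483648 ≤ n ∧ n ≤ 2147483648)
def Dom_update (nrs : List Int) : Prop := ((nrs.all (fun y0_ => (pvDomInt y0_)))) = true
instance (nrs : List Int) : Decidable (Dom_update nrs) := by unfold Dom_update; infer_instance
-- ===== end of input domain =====

-- B replaces A's one-block-at-a-time redistribution loop with a closed-form divmod distribution (O(n) vs O(val+n)).
-- A mutates its argument in place; the equivalence proved here is about the return value only (B's Python performs the same in-place update via nrs[:]).


-- ===== PORT A =====
-- the while loop of A: while val > 0: if update == len(nrs): update = 0; nrs[update] += 1; val -= 1; update += 1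
def updateLoopA (nrs : List Int) (upd : Int) (val : Int) : List Int :=
  if val > 0 then
    let upd2 := if upd = (nrs.length : Int) then 0 else upd
    let nrs2 := PySem.List.pySetD nrs upd2 ((PySem.List.pyGetD nrs upd2 0) + 1)
    updateLoopA nrs2 (upd2 + 1) (val - 1)
  else nrs
termination_by val.toNat
decreasing_by omega

def update (nrs : List Int) : List Int :=
  match PySem.List.max? nrs (fun y => y) with
  | none => nrs          -- Python: max([]) raises ValueError; excluded by Pre_update
  | some m =>
    match PySem.List.index? nrs m with
    | none => nrs        -- unreachable: the max is a member
    | some max_ind =>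
      let val := PySem.List.pyGetD nrs (max_ind : Int) 0
      let nrs1 := PySem.List.pySetD nrs (max_ind : Int) 0
      updateLoopA nrs1 ((max_ind : Int) + 1) val

-- ===== PORT B =====
def update_alt (nrs : List Int) : List Int :=
  let n : Int := nrs.length
  match PySem.List.max? nrs (fun y => y) with
  | none => nrs          -- Python: max([]) raises ValueError; excluded by Pre_update
  | some m =>
    match PySem.List.index? nrs m with
    | none => nrs        -- unreachable: the max is a member
    | some max_ind =>
      let val := PySem.List.pyGetD nrs (max_ind : Int) 0
      let q := PySem.Int.floordiv (max val 0) n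
      let r := PySem.Int.mod (max val 0) n
      let out := (PySem.List.enumerate nrs 0).map
        (fun p => p.2 + q + (if PySem.Int.mod (p.1 - (max_ind : Int) - 1) n < r then 1 else 0))
      PySem.List.pySetD out (max_ind : Int) ((PySem.List.pyGetD out (max_ind : Int) 0) - val)

-- ===== PRECONDITION & SPEC =====
-- Pre_ excludes only the empty list, on which Python's max([]) raises ValueError.
def Pre_update (nrs : List Int) : Prop := nrs ≠ []
instance (nrs : List Int) : Decidable (Pre_update nrs) := by unfold Pre_update; infer_instance
def pvWitness_update : List Int := [0, 2, 7, 0]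

def Spec_update (nrs : List Int) (out : List Int) : Prop := out = update_alt nrs
instance (nrs : List Int) (out : List Int) : Decidable (Spec_update nrs out) := by unfold Spec_update; infer_instance

-- ===== CLAIM (what is proved, stated in full; the proofs are below) =====
def Claim_equal_update : Prop := ∀ (nrs : List Int), Dom_update nrs → Pre_update nrs → Spec_update nrs (update nrs)

-- ===== LEMMAS AND PROOFS =====

-- number of increments index i receives when val blocks are dealt cyclically starting at pointer u (n = length)
def updCnt (n u val i : Int) : Int :=
  val / n + (if (i - u) % n < val % n then 1 else 0)

theorem emod_sub_one (a n : Int) (h : 0 < n) :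
    (a - 1) % n = if a % n = 0 then n - 1 else a % n - 1 := by
  have key : (a - 1) % n = (a % n - 1) % n := by
    conv_rhs => rw [Int.sub_emod, Int.emod_emod_of_dvd a dvd_rfl, ← Int.sub_emod]
  have hb0 : 0 ≤ a % n := Int.emod_nonneg a (by omega)
  have hb1 : a % n < n := Int.emod_lt_of_pos a h
  split_ifs with h0
  · rw [key, h0]
    have : (0 - 1 : Int) = (n - 1) + n * (-1) := by ring
    rw [this, Int.add_mul_emod_self_left, Int.emod_eq_of_lt (by omega) (by omega)]
  · rw [key, Int.emod_eq_of_lt (by omega) (by omega)]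

theorem ediv_sub_one (val n : Int) (h : 0 < n) :
    (val - 1) / n = if val % n = 0 then val / n - 1 else val / n := by
  have h1 : val % n + n * (val / n) = val := Int.emod_add_ediv val n
  have h2 : (val - 1) % n + n * ((val - 1) / n) = val - 1 := Int.emod_add_ediv (val - 1) n
  have h3 := emod_sub_one val n h
  have hne : n ≠ 0 := by omega
  split_ifs with h0
  · rw [if_pos h0] at h3
    apply mul_left_cancel₀ hne
    rw [mul_sub, mul_one]
    linarith
  · rw [if_neg h0] at h3
    apply mul_left_cancel₀ hne
    linarith

-- a = (i-u)%n is 0 exactly when i = u, for i, u both in [0, n)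
theorem emod_diff_eq_zero_iff (i u n : Int) (hn : 0 < n)
    (hi0 : 0 ≤ i) (hi1 : i < n) (hu0 : 0 ≤ u) (hu1 : u < n) :
    (i - u) % n = 0 ↔ i = u := by
  constructor
  · intro h
    rcases Int.dvd_of_emod_eq_zero h with ⟨k, hk⟩
    have hk0 : k = 0 := by nlinarith
    rw [hk0, mul_zero] at hk
    omega
  · intro h; simp [h]

-- one step of the distribution: dealing one block at u and continuing with val-1 from u+1
theorem updCnt_step (n u i val : Int) (hn : 0 < n)
    (hu0 : 0 ≤ u) (hu1 : u < n) (hi0 : 0 ≤ i) (hi1 : i < n) (hv : 1 ≤ val) :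
    updCnt n (u + 1) (val - 1) i + (if i = u then 1 else 0) = updCnt n u val i := by
  unfold updCnt
  have ha0 : 0 ≤ (i - u) % n := Int.emod_nonneg _ (by omega)
  have ha1 : (i - u) % n < n := Int.emod_lt_of_pos _ hn
  have hr0 : 0 ≤ val % n := Int.emod_nonneg _ (by omega)
  have hr1 : val % n < n := Int.emod_lt_of_pos _ hn
  have key1 : (i - (u + 1)) % n = if (i - u) % n = 0 then n - 1 else (i - u) % n - 1 := by
    have : i - (u + 1) = (i - u) - 1 := by ring
    rw [this, emod_sub_one _ _ hn]
  have key2 := emod_sub_one val n hn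
  have key3 := ediv_sub_one val n hn
  have key4 := emod_diff_eq_zero_iff i u n hn hi0 hi1 hu0 hu1
  rw [key1, key2, key3]
  by_cases hz : (i - u) % n = 0
  · have hiu : i = u := key4.mp hz
    simp only [if_pos hz, if_pos hiu]
    split_ifs <;> omega
  · have hne' : i ≠ u := fun hc => hz (key4.mpr hc)
    simp only [if_neg hz, if_neg hne']
    split_ifs <;> omega

-- elementwise value of A's dealing loop, for pointer 0 ≤ u ≤ n and a whole number of blocks
theorem updateLoopA_closed (k : Nat) : ∀ (xs : List Int) (u : Int),
    0 < xs.length → 0 ≤ u → u ≤ (xs.length : Int) →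
    updateLoopA xs u (k : Int) =
      xs.mapIdx (fun i x => x + updCnt (xs.length : Int) u (k : Int) (i : Int)) := by
  induction k with
  | zero =>
    intro xs u hn hu0 hu1
    rw [updateLoopA, if_neg (by simp)]
    apply List.ext_getElem (by simp)
    intro i h1 h2
    simp only [List.getElem_mapIdx, updCnt, Int.natCast_zero, Int.zero_ediv, Int.zero_emod]
    have hm0 : 0 ≤ ((i : Int) - u) % (xs.length : Int) := Int.emod_nonneg _ (by omega)
    rw [if_neg (by omega)]
    ring
  | succ k ih =>
    intro xs u hn hu0 hu1
    rw [updateLoopA]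
    rw [if_pos (by push_cast; omega)]
    have hlen : (0 : Int) ≤ (xs.length : Int) := by positivity
    set u2 : Int := if u = (xs.length : Int) then 0 else u with hu2
    have hu20 : 0 ≤ u2 := by rw [hu2]; split_ifs <;> omega
    have hu21 : u2 < (xs.length : Int) := by rw [hu2]; split_ifs <;> omega
    have hset : PySem.List.pySetD xs u2 (PySem.List.pyGetD xs u2 0 + 1)
        = xs.set u2.toNat (xs[u2.toNat]'(by omega) + 1) := by
      rw [PySem.List.pySetD_of_nonneg (h := hu20),
          PySem.List.pyGetD_eq_getElem xs 0 hu20 (by push_cast; omega)]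
    show updateLoopA (PySem.List.pySetD xs u2 (PySem.List.pyGetD xs u2 0 + 1)) (u2 + 1)
        (((k : Nat) + 1 : Nat) - 1 : Int) = _
    rw [hset]
    have hcast : (((k : Nat) + 1 : Nat) : Int) - 1 = (k : Int) := by push_cast; ring
    rw [hcast]
    have hlen2 : (xs.set u2.toNat (xs[u2.toNat]'(by omega) + 1)).length = xs.length := by simp
    rw [ih _ (u2 + 1) (by omega) (by omega) (by rw [hlen2]; omega)]
    apply List.ext_getElem (by simp)
    intro i h1 h2
    simp only [List.getElem_mapIdx, hlen2, List.getElem_set]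
    have hstep := updCnt_step (xs.length : Int) u2 (i : Int) ((k : Int) + 1) (by omega)
      hu20 hu21 (by positivity) (by simp at h2; push_cast; omega) (by omega)
    have hsame : updCnt (xs.length : Int) u2 ((k:Int)+1) (i:Int)
        = updCnt (xs.length : Int) u ((k:Int)+1) (i:Int) := by
      rw [hu2]; split_ifs with hq
      · unfold updCnt
        rw [hq]
        have : (i : Int) - (xs.length : Int) = (i : Int) - 0 + (xs.length : Int) * (-1) := by ring
        rw [this, Int.add_mul_emod_self_left]
      · rfl
    have hiu : u2.toNat = i ↔ (i : Int) = u2 := by omega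
    have hk1 : (((k : Nat) + 1 : Nat) : Int) = (k : Int) + 1 := by push_cast; ring
    have hstep' : updCnt ((xs.length : Nat) : Int) (u2 + 1) (k : Int) (i : Int)
          + (if (i : Int) = u2 then 1 else 0)
        = updCnt ((xs.length : Nat) : Int) u ((((k : Nat) + 1 : Nat)) : Int) (i : Int) := by
      rw [hk1]
      rw [show ((k : Int) + 1 - 1) = (k : Int) from by ring] at hstep
      exact hstep.trans hsame
    rw [← hstep']
    by_cases he : u2.toNat = i
    · rw [if_pos he, if_pos (hiu.mp he)]
      subst he
      ring
    · rw [if_neg he, if_neg (fun hc => he (hiu.mpr hc))]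
      ring

-- the element (i, xs[i]) of enumerate
theorem enumerate_getElem? {α : Type} : ∀ (xs : List α) (s : Int) (i : Nat),
    (PySem.List.enumerate xs s)[i]? = xs[i]?.map (fun x => (s + (i : Int), x)) := by
  intro xs
  induction xs with
  | nil => intro s i; simp [PySem.List.enumerate_nil]
  | cons x t ih =>
    intro s i
    rw [PySem.List.enumerate_cons]
    cases i with
    | zero => simp
    | succ j =>
      have hc : (s + 1) + (j : Int) = s + ((j : Nat) + 1 : Nat) := by push_cast; ring
      simp only [List.getElem?_cons_succ, ih (s + 1) j, hc]

theorem enumerate_getElem {α : Type} (xs : List α) (s : Int) (i : Nat) (h : i < xs.length) :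
    (PySem.List.enumerate xs s)[i]'(by rw [PySem.List.length_enumerate]; exact h)
      = (s + (i : Int), xs[i]) := by
  have h2 := enumerate_getElem? xs s i
  rw [List.getElem?_eq_getElem h,
      List.getElem?_eq_getElem (by rw [PySem.List.length_enumerate]; exact h)] at h2
  simpa using h2

-- ===== VERDICT (by name: the statement is the Claim_ definition above) =====
theorem update_spec : Claim_equal_update := by
  intro nrs _hdom _hpre
  unfold Spec_update update update_alt
  cases hmax : PySem.List.max? nrs (fun y => y) with
  | none => rfl
  | some m =>
    have hmem : m ∈ nrs := PySem.List.max?_mem hmax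
    cases hidx : PySem.List.index? nrs m with
    | none =>
      rw [PySem.List.index?_eq_idxOf?, List.idxOf?_eq_none_iff] at hidx
      exact absurd hmem hidx
    | some max_ind =>
      obtain ⟨hk, hget, -⟩ := PySem.List.getElem_of_index?_eq_some hidx
      simp only [hidx]
      have hn : 0 < nrs.length := by omega
      have hnI : (0:Int) < (nrs.length : Int) := by exact_mod_cast hn
      set n : Int := (nrs.length : Int) with hndef
      set val : Int := PySem.List.pyGetD nrs (max_ind : Int) 0 with hval
      have hvalg : val = nrs[max_ind]'hk := by
        rw [hval, PySem.List.pyGetD_eq_getElem nrs 0 (by positivity) (by push_cast; omega)]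
        simp
      have hmod : ∀ a : Int, PySem.Int.mod a n = a % n :=
        fun a => PySem.Int.mod_eq_emod_of_pos (a := a) hnI
      have hdiv : ∀ a : Int, PySem.Int.floordiv a n = a / n :=
        fun a => PySem.Int.floordiv_eq_ediv_of_pos (a := a) hnI
      set q : Int := PySem.Int.floordiv (max val 0) n with hq
      set r : Int := PySem.Int.mod (max val 0) n with hr
      set out : List Int := (PySem.List.enumerate nrs 0).map
        (fun p => p.2 + q + (if PySem.Int.mod (p.1 - (max_ind : Int) - 1) n < r then 1 else 0))
        with hout
      have houtlen : out.length = nrs.length := by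
        rw [hout]; simp [PySem.List.length_enumerate]
      have hgetout? : ∀ (j : Nat) (hj : j < nrs.length),
          out[j]? = some (nrs[j]'hj + q
            + (if PySem.Int.mod ((j : Int) - (max_ind : Int) - 1) n < r then 1 else 0)) := by
        intro j hj
        rw [hout, List.getElem?_map, enumerate_getElem? nrs 0 j, List.getElem?_eq_getElem hj]
        simp
      have hgetout : ∀ (j : Nat) (hj : j < nrs.length),
          out[j]'(by omega) = nrs[j]'hj + q
            + (if PySem.Int.mod ((j : Int) - (max_ind : Int) - 1) n < r then 1 else 0) := by
        intro j hj
        have h2 := hgetout? j hj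
        rw [List.getElem?_eq_getElem (by omega)] at h2
        exact Option.some.inj h2
      have hsetA : PySem.List.pySetD nrs (max_ind : Int) 0 = nrs.set max_ind 0 := by
        simp [PySem.List.pySetD_natCast]
      rw [hsetA, PySem.List.pySetD_natCast]
      have hgetoutI : PySem.List.pyGetD out (max_ind : Int) 0
          = nrs[max_ind]'hk + q
            + (if PySem.Int.mod ((max_ind : Int) - (max_ind : Int) - 1) n < r then 1 else 0) := by
        rw [PySem.List.pyGetD_eq_getElem out 0 (by positivity) (by rw [houtlen]; push_cast; omega)]
        have h1 : (max_ind : Int).toNat = max_ind := by omega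
        have h2 := hgetout max_ind hk
        simp only [h1]
        exact h2
      by_cases hvpos : 0 < val
      · have hmaxv : max val 0 = val := by omega
        have hvk : val = ((val.toNat : Nat) : Int) := by omega
        have hA := updateLoopA_closed val.toNat (nrs.set max_ind 0) ((max_ind : Int) + 1)
          (by simp; omega) (by positivity) (by simp; push_cast; omega)
        rw [hvk, hA]
        apply List.ext_getElem (by simp [houtlen])
        intro i h1 h2
        have hi : i < nrs.length := by simpa using h1
        rw [List.getElem_mapIdx]
        have hlenset : (nrs.set max_ind 0).length = nrs.length := by simp
        have hcnt : updCnt ((nrs.set max_ind 0).length : Int) ((max_ind : Int) + 1)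
              ((val.toNat : Nat) : Int) (i : Int)
            = q + (if PySem.Int.mod ((i : Int) - (max_ind : Int) - 1) n < r then 1 else 0) := by
          unfold updCnt
          rw [hlenset, ← hndef, ← hvk, hq, hr, hmaxv, hdiv, hmod]
          have harg : (i : Int) - ((max_ind : Int) + 1) = (i : Int) - (max_ind : Int) - 1 := by
            ring
          rw [harg, hmod val]
        rw [hcnt, List.getElem_set, List.getElem_set]
        by_cases he : max_ind = i
        · rw [if_pos he, if_pos he]
          subst he
          rw [hgetoutI, ← hvalg, ← hvk]
          ring
        · rw [if_neg he, if_neg he, hgetout i hi]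
          ring
      · -- val ≤ 0 : A's loop is a no-op; in B q = r = 0 and the subtraction restores 0 at max_ind
        have hmaxv : max val 0 = 0 := by omega
        have hq0 : q = 0 := by rw [hq, hmaxv, hdiv]; exact Int.zero_ediv n
        have hr0 : r = 0 := by rw [hr, hmaxv, hmod]; exact Int.zero_emod n
        rw [updateLoopA, if_neg (by omega)]
        apply List.ext_getElem (by simp [houtlen])
        intro i h1 h2
        have hi : i < nrs.length := by simpa using h1
        have hbit : ∀ a : Int, (if PySem.Int.mod a n < r then (1:Int) else 0) = 0 := by
          intro a
          have hnn : (0:Int) ≤ a % n := Int.emod_nonneg a (by omega)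
          rw [hr0, hmod, if_neg (not_lt.mpr hnn)]
        rw [List.getElem_set, List.getElem_set]
        by_cases he : max_ind = i
        · rw [if_pos he, if_pos he]
          subst he
          rw [hgetoutI, ← hvalg, hq0, hbit]
          ring
        · rw [if_neg he, if_neg he, hgetout i hi, hq0, hbit]
          ring
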